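-- pv_equiv track=rewrite | github.com/AliceInWonderland61/spring2025-python | Week3/week-3-S1-P2.py | make_smallest_watchlist
-- ===== SOURCE A (Python) =====
-- def make_smallest_watchlist(watchlist):
--     #alriiggghhtty let's start following instructions
--
--     #convert the watchlist string to a list
--     watchlist=list(watchlist)
--
--     #initialize two pointers: left and right
--     left=0
--     right=len(watchlist)-1
--
--     #while the left pointer is less thatn the right pointer
--     while (left<right):
--         #compare the charactesrs at the left and right pointeres
--         if watchlist[left]!=watchlist[right]:
--             #replace the character that is alphabetically later with the onte that is ealier (so i'm assuming the right one replaces the left one)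
--             if watchlist[left]>watchlist[right]:
--                 watchlist[left]=watchlist[right]
--             else:
--                 watchlist[right]=watchlist[left]
--         #move the left pointer one step to the right and the right pointer one tep to the left
--         left+=1
--         right-=1
--
--         #Conver the list back to a string
--     watchlist=''.join(watchlist)
--     return watchlist
-- ===== SOURCE B (Python) =====
-- def make_smallest_watchlist(watchlist):
--     n = len(watchlist)
--     h = n // 2
--     left = watchlist[:h]
--     right_rev = watchlist[n - h:][::-1]
--     new_left = [min(a, b) for a, b in zip(left, right_rev)]
--     mid = watchlist[h:n - h]
--     return ''.join(new_left) + mid + ''.join(reversed(new_left))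
-- ===== Notes on version B (the rewrite author's own statement) =====
-- stated objective: alternative
-- what changed: Replaces the in-place two-pointer mutation loop with a halves split: zip the left half with the reversed right half, map min over the pairs, keep the odd middle character, and mirror the computed left half to rebuild the string.
import Mathlib
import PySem

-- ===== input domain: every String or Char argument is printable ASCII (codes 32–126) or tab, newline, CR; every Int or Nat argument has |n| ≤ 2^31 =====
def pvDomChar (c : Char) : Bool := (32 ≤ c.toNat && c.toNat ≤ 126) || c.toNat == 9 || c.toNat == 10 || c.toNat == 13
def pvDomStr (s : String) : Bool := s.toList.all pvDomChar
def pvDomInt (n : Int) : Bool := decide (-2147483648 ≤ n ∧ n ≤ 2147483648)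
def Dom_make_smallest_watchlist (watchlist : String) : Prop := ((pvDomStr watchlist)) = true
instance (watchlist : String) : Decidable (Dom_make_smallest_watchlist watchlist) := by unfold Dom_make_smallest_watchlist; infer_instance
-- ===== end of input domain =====

-- B replaces A's in-place two-pointer mutation loop by a halves split (zip the left half with
-- the reversed right half, map min over the pairs, mirror it back); alternative decomposition, same O(n) cost.

-- ===== PORT A =====
-- the while loop; indices stay inside [0, length) whenever l < r, so Nat indexing with getD is exact
def pvLoopA (xs : List Char) (l r : Nat) : List Char :=
  if _h : l < r then
    pvLoopA
      (if xs.getD l ' ' ≠ xs.getD r ' ' then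
         if xs.getD r ' ' < xs.getD l ' ' then xs.set l (xs.getD r ' ')
         else xs.set r (xs.getD l ' ')
       else xs) (l + 1) (r - 1)
  else xs
termination_by r - l

def make_smallest_watchlist (watchlist : String) : String :=
  let cs := watchlist.toList
  String.ofList (pvLoopA cs 0 (cs.length - 1))

-- ===== PORT B =====
def make_smallest_watchlist_alt (watchlist : String) : String :=
  let cs := watchlist.toList
  let n : Int := cs.length
  let h : Int := PySem.Int.floordiv n 2
  let left := PySem.List.slice cs none (some h)                      -- watchlist[:h]
  let rightRev := (PySem.List.slice cs (some (n - h)) none).reverse  -- watchlist[n-h:][::-1]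
  let newLeft := (left.zip rightRev).map (fun p => min p.1 p.2)
  let mid := PySem.List.slice cs (some h) (some (n - h))             -- watchlist[h:n-h]
  String.ofList (newLeft ++ mid ++ newLeft.reverse)

-- ===== PRECONDITION & SPEC =====
def Spec_make_smallest_watchlist (watchlist : String) (out : String) : Prop := out = make_smallest_watchlist_alt watchlist
instance (watchlist : String) (out : String) : Decidable (Spec_make_smallest_watchlist watchlist out) := by unfold Spec_make_smallest_watchlist; infer_instance

-- ===== CLAIM (what is proved, stated in full; the proofs are below) =====
def Claim_equal_make_smallest_watchlist : Prop := ∀ (watchlist : String), Dom_make_smallest_watchlist watchlist → Spec_make_smallest_watchlist watchlist (make_smallest_watchlist watchlist)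

-- ===== LEMMAS AND PROOFS =====

-- common characterisation: position i of the result holds min(cs[i], cs[n-1-i])
def pvSpecList (cs : List Char) : List Char :=
  (List.range cs.length).map (fun i => min (cs.getD i ' ') (cs.getD (cs.length - 1 - i) ' '))

lemma pv_map_getD_range (cs : List Char) :
    (List.range cs.length).map (fun i => cs.getD i ' ') = cs := by
  apply List.ext_getElem
  · simp
  · intro i h1 h2
    simp [List.getD_eq_getElem?_getD, h2]

lemma pv_set_getD (xs : List Char) (i j : Nat) (c : Char) :
    (xs.set i c).getD j ' ' = if i = j ∧ i < xs.length then c else xs.getD j ' ' := by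
  by_cases hij : i = j
  · subst hij
    by_cases hlt : i < xs.length
    · simp [List.getD_eq_getElem?_getD, hlt]
    · simp [List.getD_eq_getElem?_getD, hlt]
  · simp [List.getD_eq_getElem?_getD, hij]

lemma pv_triv (xs : List Char) (l r : Nat) (hlr : ¬ l < r) :
    (List.range xs.length).map
      (fun i => if l ≤ i ∧ i ≤ r then min (xs.getD i ' ') (xs.getD (l + r - i) ' ')
                else xs.getD i ' ') = xs := by
  conv_rhs => rw [← pv_map_getD_range xs]
  apply List.map_congr_left
  intro i _
  by_cases hc : l ≤ i ∧ i ≤ r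
  · have hir : l + r - i = i := by omega
    rw [if_pos hc, hir, min_self]
  · rw [if_neg hc]

lemma pv_loopA_eq (k : Nat) : ∀ (xs : List Char) (l r : Nat), r - l ≤ k →
    l + r + 1 = xs.length →
    pvLoopA xs l r = (List.range xs.length).map
      (fun i => if l ≤ i ∧ i ≤ r then min (xs.getD i ' ') (xs.getD (l + r - i) ' ')
                else xs.getD i ' ') := by
  induction k with
  | zero =>
    intro xs l r hk hn
    have hlr : ¬ l < r := by omega
    rw [pvLoopA, dif_neg hlr, pv_triv xs l r hlr]
  | succ k ih =>
    intro xs l r hk hn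
    by_cases hlr : l < r
    · rw [pvLoopA, dif_pos hlr]
      set a := xs.getD l ' ' with ha
      set b := xs.getD r ' ' with hb
      set xs' := if a ≠ b then (if b < a then xs.set l b else xs.set r a) else xs with hxs'
      have hlen : xs'.length = xs.length := by
        rw [hxs']; split_ifs <;> simp
      have hl_lt : l < xs.length := by omega
      have hr_lt : r < xs.length := by omega
      have hother : ∀ j, j ≠ l → j ≠ r → xs'.getD j ' ' = xs.getD j ' ' := by
        intro j hjl hjr
        rw [hxs']
        split_ifs
        · rw [pv_set_getD, if_neg (fun hc => hjl hc.1.symm)]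
        · rw [pv_set_getD, if_neg (fun hc => hjr hc.1.symm)]
        · rfl
      have hgl : xs'.getD l ' ' = min a b := by
        rcases lt_trichotomy a b with h1 | h1 | h1
        · rw [hxs', if_pos h1.ne, if_neg (lt_asymm h1),
            pv_set_getD, if_neg (fun hc => (by omega : r ≠ l) hc.1)]
          rw [← ha]; exact (min_eq_left h1.le).symm
        · rw [hxs', if_neg (fun hne => hne h1), ← ha, h1, min_self]
        · rw [hxs', if_pos h1.ne', if_pos h1, pv_set_getD, if_pos ⟨rfl, hl_lt⟩]
          exact (min_eq_right h1.le).symm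
      have hgr : xs'.getD r ' ' = min a b := by
        rcases lt_trichotomy a b with h1 | h1 | h1
        · rw [hxs', if_pos h1.ne, if_neg (lt_asymm h1),
            pv_set_getD, if_pos ⟨rfl, hr_lt⟩]
          exact (min_eq_left h1.le).symm
        · rw [hxs', if_neg (fun hne => hne h1), ← hb, h1, min_self]
        · rw [hxs', if_pos h1.ne', if_pos h1,
            pv_set_getD, if_neg (fun hc => (by omega : l ≠ r) hc.1)]
          rw [← hb]; exact (min_eq_right h1.le).symm
      rw [ih xs' (l + 1) (r - 1) (by omega) (by omega)]
      rw [hlen]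
      apply List.map_congr_left
      intro i hi
      have hi' : i < xs.length := List.mem_range.mp hi
      have hsum : (l + 1) + (r - 1) = l + r := by omega
      by_cases hc1 : l + 1 ≤ i ∧ i ≤ r - 1
      · have hcl : l ≤ i ∧ i ≤ r := by omega
        simp only [hc1, and_self, if_true, hsum, hcl]
        rw [hother i (by omega) (by omega), hother _ (by omega) (by omega)]
      · by_cases hil : i = l
        · rw [hil, hsum, if_neg (show ¬ (l + 1 ≤ l ∧ l ≤ r - 1) by omega),
            if_pos (show l ≤ l ∧ l ≤ r by omega),
            (by omega : l + r - l = r), ← ha, ← hb, hgl]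
        · by_cases hir : i = r
          · rw [hir, hsum, if_neg (show ¬ (l + 1 ≤ r ∧ r ≤ r - 1) by omega),
              if_pos (show l ≤ r ∧ r ≤ r by omega),
              (by omega : l + r - r = l), ← ha, ← hb, hgr, min_comm a b]
          · have hcl : ¬ (l ≤ i ∧ i ≤ r) := by omega
            rw [hsum, if_neg hc1, if_neg hcl]
            exact hother i hil hir
    · rw [pvLoopA, dif_neg hlr, pv_triv xs l r hlr]

lemma pv_A_eq (s : String) : make_smallest_watchlist s = String.ofList (pvSpecList s.toList) := by
  show String.ofList (pvLoopA s.toList 0 (s.toList.length - 1)) = String.ofList (pvSpecList s.toList)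
  unfold pvSpecList
  rcases hcs : s.toList with _ | ⟨c, cs⟩
  · simp [pvLoopA]
  · set xs := c :: cs with hxs
    have hn : 0 < xs.length := by simp [hxs]
    rw [pv_loopA_eq (xs.length - 1) xs 0 (xs.length - 1) (by omega) (by omega)]
    congr 1
    apply List.map_congr_left
    intro i hi
    have hi' : i < xs.length := List.mem_range.mp hi
    have hc : (0 ≤ i ∧ i ≤ xs.length - 1) := by omega
    rw [if_pos hc, (by omega : 0 + (xs.length - 1) - i = xs.length - 1 - i)]

lemma pv_B_eq (s : String) : make_smallest_watchlist_alt s = String.ofList (pvSpecList s.toList) := by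
  unfold make_smallest_watchlist_alt pvSpecList
  dsimp only
  set cs := s.toList with hcs
  have hfd : PySem.Int.floordiv ((cs.length : Int)) 2 = ((cs.length / 2 : Nat) : Int) := by
    exact_mod_cast PySem.Int.floordiv_natCast cs.length 2
  have hnh : (cs.length : Int) - ((cs.length / 2 : Nat) : Int)
      = ((cs.length - cs.length / 2 : Nat) : Int) := by omega
  rw [hfd, hnh, PySem.List.slice_to_natCast, PySem.List.slice_from_natCast,
    PySem.List.slice_natCast]
  set n := cs.length with hn
  set h := n / 2 with hh
  have hb2 : 2 * h ≤ n ∧ n ≤ 2 * h + 1 := by omega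
  congr 1
  have hNLlen : (((cs.take h).zip (cs.drop (n - h)).reverse).map
      (fun p => min p.1 p.2)).length = h := by
    simp; omega
  have hmidlen : (List.take (n - h - h) (List.drop h cs)).length = n - 2 * h := by
    simp; omega
  have hNLval : ∀ j, j < h →
      (((cs.take h).zip (cs.drop (n - h)).reverse).map (fun p => min p.1 p.2))[j]? =
        some (min (cs.getD j ' ') (cs.getD (n - 1 - j) ' ')) := by
    intro j hj
    have hjn : j < n := by omega
    rw [List.getElem?_map, List.zip_eq_zipWith, List.getElem?_zipWith,
      List.getElem?_take_of_lt hj,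
      List.getElem?_reverse (by simp; omega), List.getElem?_drop]
    rw [(by simp; omega : n - h + ((cs.drop (n - h)).length - 1 - j) = n - 1 - j)]
    have hj1 : j < cs.length := hjn
    have hj2 : n - 1 - j < cs.length := by omega
    simp [List.getD_eq_getElem?_getD, hj1, hj2]
  apply List.ext_getElem?
  intro i
  by_cases hin : i < n
  · have hRHS : ((List.range n).map
        (fun i => min (cs.getD i ' ') (cs.getD (n - 1 - i) ' ')))[i]? =
          some (min (cs.getD i ' ') (cs.getD (n - 1 - i) ' ')) := by
      simp [hin]
    rw [hRHS]
    by_cases h1 : i < h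
    · rw [List.getElem?_append_left
          (by simp only [List.length_append, hNLlen, hmidlen]; omega),
        List.getElem?_append_left (by rw [hNLlen]; omega)]
      exact hNLval i h1
    · by_cases h2 : i < n - h
      · -- middle character: only reachable when n is odd and i = h
        rw [List.getElem?_append_left
            (by simp only [List.length_append, hNLlen, hmidlen]; omega),
          List.getElem?_append_right (by rw [hNLlen]; omega), hNLlen,
          List.getElem?_take_of_lt (by omega),
          List.getElem?_drop, (by omega : h + (i - h) = i),
          (by omega : n - 1 - i = i), min_self]
        have hi1 : i < cs.length := by omega
        simp [List.getD_eq_getElem?_getD, hi1]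
      · -- mirrored right half
        rw [List.getElem?_append_right
            (by simp only [List.length_append, hNLlen, hmidlen]; omega)]
        rw [(show (List.map (fun p => min p.1 p.2)
              ((List.take h cs).zip (List.drop (n - h) cs).reverse) ++
              List.take (n - h - h) (List.drop h cs)).length = n - h from by
            simp only [List.length_append, hNLlen, hmidlen]; omega)]
        rw [List.getElem?_reverse (by rw [hNLlen]; omega), hNLlen]
        rw [hNLval (h - 1 - (i - (n - h))) (by omega)]
        rw [(by omega : n - 1 - (h - 1 - (i - (n - h))) = i)]
        rw [(by omega : h - 1 - (i - (n - h)) = n - 1 - i)]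
        rw [min_comm]
  · rw [List.getElem?_eq_none (by simp only [List.length_append, List.length_reverse, hNLlen, hmidlen]; omega),
      List.getElem?_eq_none (by simp only [List.length_map, List.length_range]; omega)]

-- ===== VERDICT (by name: the statement is the Claim_ definition above) =====
theorem make_smallest_watchlist_spec : Claim_equal_make_smallest_watchlist := by
  intro s _
  unfold Spec_make_smallest_watchlist
  rw [pv_A_eq, pv_B_eq]
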